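-- pv_equiv track=rewrite | github.com/jordenrsantos-sys/MTG-Deck | api/engine/deck_completion_v0.py | _weakest_need_bucket_v0_1
-- ===== SOURCE A (Python) =====
-- from typing import Any, Dict, List, Tuple
--
-- def _weakest_need_bucket_v0_1(category_counts: Dict[str, int], targets: Dict[str, int]) -> str:
--     ordered = ["ramp", "draw", "interaction", "protection", "wincon"]
--     deficits: List[Tuple[int, int, str]] = []
--     for idx, bucket in enumerate(ordered):
--         target_key = f"{bucket}_target"
--         deficit = int(targets.get(target_key, 0)) - int(category_counts.get(bucket, 0))
--         deficits.append((deficit, -idx, bucket))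
--     deficits.sort(reverse=True)
--     if deficits and deficits[0][0] > 0:
--         return deficits[0][2]
--     return "redundancy"
-- ===== SOURCE B (Python) =====
-- def _weakest_need_bucket_v0_1(category_counts, targets):
--     best_bucket = "redundancy"
--     best_deficit = 0
--     for bucket in ("ramp", "draw", "interaction", "protection", "wincon"):
--         deficit = int(targets.get(f"{bucket}_target", 0)) - int(category_counts.get(bucket, 0))
--         if deficit > best_deficit:
--             best_deficit = deficit
--             best_bucket = bucket
--     return best_bucket
-- ===== Notes on version B (the rewrite author's own statement) =====
-- stated objective: simpler
-- what changed: Replaces A's build-a-list-of-(deficit,-idx,bucket)-tuples-then-reverse-sort strategy with a single best-so-far scan over the five buckets, using a strict '>' update (earliest bucket wins ties) and initialising best to ('redundancy', 0) so the deficit>0 gate falls out of the initial value.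
import Mathlib
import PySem

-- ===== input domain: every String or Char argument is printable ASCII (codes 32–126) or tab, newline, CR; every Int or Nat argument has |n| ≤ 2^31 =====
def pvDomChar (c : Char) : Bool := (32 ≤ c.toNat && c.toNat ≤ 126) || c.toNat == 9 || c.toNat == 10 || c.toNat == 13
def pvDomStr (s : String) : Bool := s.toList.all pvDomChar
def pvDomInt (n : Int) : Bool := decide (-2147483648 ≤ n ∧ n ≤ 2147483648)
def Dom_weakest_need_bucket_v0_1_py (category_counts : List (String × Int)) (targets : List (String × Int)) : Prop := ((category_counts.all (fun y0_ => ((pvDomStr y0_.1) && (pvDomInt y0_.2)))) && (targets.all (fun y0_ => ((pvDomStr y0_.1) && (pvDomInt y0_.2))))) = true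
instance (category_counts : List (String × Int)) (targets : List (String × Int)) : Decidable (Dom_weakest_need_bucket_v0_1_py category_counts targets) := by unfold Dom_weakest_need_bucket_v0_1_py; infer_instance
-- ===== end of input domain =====

-- B replaces A's build-tuples-then-reverse-sort strategy with a single linear best-so-far scan (objective: simpler).

-- ===== PORT A =====
def pvOrderedA : List String := ["ramp", "draw", "interaction", "protection", "wincon"]

-- Python reverse-sorts the (deficit, -idx, bucket) triples lexicographically; the -idx components
-- are pairwise distinct by construction, so the third (string) component is never compared and
-- sorted2 on the key pair (deficit, -idx) is exact here.
def weakest_need_bucket_v0_1_py (category_counts : List (String × Int)) (targets : List (String × Int)) : String :=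
  let deficits : List (Int × Int × String) :=
    (PySem.List.enumerate pvOrderedA).foldl (fun acc p =>
      let idx := p.1
      let bucket := p.2
      let target_key := bucket ++ "_target"
      let deficit := PySem.Dict.getD ⟨targets⟩ target_key 0 - PySem.Dict.getD ⟨category_counts⟩ bucket 0
      acc ++ [(deficit, -idx, bucket)]) []
  let ds := PySem.List.sorted2 deficits (fun x => x.1) (fun x => x.2.1) true
  match ds with
  | [] => "redundancy"
  | (d, _, b) :: _ => if d > 0 then b else "redundancy"

-- ===== PORT B =====
def weakest_need_bucket_v0_1_py_alt (category_counts : List (String × Int)) (targets : List (String × Int)) : String :=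
  (["ramp", "draw", "interaction", "protection", "wincon"].foldl (fun best bucket =>
      let deficit := PySem.Dict.getD ⟨targets⟩ (bucket ++ "_target") 0 - PySem.Dict.getD ⟨category_counts⟩ bucket 0
      if deficit > best.2 then (bucket, deficit) else best)
    ("redundancy", (0 : Int))).1

-- ===== PRECONDITION & SPEC =====
def Spec_weakest_need_bucket_v0_1_py (category_counts : List (String × Int)) (targets : List (String × Int)) (out : String) : Prop := out = weakest_need_bucket_v0_1_py_alt category_counts targets
instance (category_counts : List (String × Int)) (targets : List (String × Int)) (out : String) : Decidable (Spec_weakest_need_bucket_v0_1_py category_counts targets out) := by unfold Spec_weakest_need_bucket_v0_1_py; infer_instance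

-- ===== CLAIM (what is proved, stated in full; the proofs are below) =====
def Claim_equal_weakest_need_bucket_v0_1_py : Prop := ∀ (category_counts : List (String × Int)) (targets : List (String × Int)), Dom_weakest_need_bucket_v0_1_py category_counts targets → Spec_weakest_need_bucket_v0_1_py category_counts targets (weakest_need_bucket_v0_1_py category_counts targets)

-- ===== LEMMAS AND PROOFS =====

-- lex key for the triples: second components lie in [-4, 0], so 5*d + j orders (d, j) lexicographically
def pvKey (x : Int × Int × String) : Int := 5 * x.1 + x.2.1

theorem pv_insertBy_congr {α : Type} (b1 b2 : α → α → Bool) (x : α) (ys : List α)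
    (h : ∀ y ∈ ys, b1 x y = b2 x y) :
    PySem.List.insertBy b1 x ys = PySem.List.insertBy b2 x ys := by
  induction ys with
  | nil => rfl
  | cons y ys ih =>
      simp only [PySem.List.insertBy]
      rw [h y (by simp)]
      by_cases hb : b2 x y = true
      · simp [hb]
      · simp only [Bool.not_eq_true] at hb
        simp [hb, ih (fun z hz => h z (by simp [hz]))]

theorem pv_foldl_insertBy_congr {α : Type} (b1 b2 : α → α → Bool) (P : α → Prop)
    (hagree : ∀ a b, P a → P b → b1 a b = b2 a b) :
    ∀ (xs acc : List α), (∀ x ∈ xs, P x) → (∀ a ∈ acc, P a) →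
      xs.foldl (fun acc x => PySem.List.insertBy b1 x acc) acc
        = xs.foldl (fun acc x => PySem.List.insertBy b2 x acc) acc := by
  intro xs
  induction xs with
  | nil => intro acc _ _; rfl
  | cons x xs ih =>
      intro acc hxs hacc
      simp only [List.foldl]
      rw [pv_insertBy_congr b1 b2 x acc
        (fun y hy => hagree x y (hxs x (by simp)) (hacc y hy))]
      exact ih _ (fun z hz => hxs z (by simp [hz]))
        (fun a ha => by
          rcases (PySem.List.insertBy_mem_iff b2 x a acc).1 ha with rfl | ha
          · exact hxs a (by simp)
          · exact hacc a ha)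

theorem pv_sorted2_eq_sorted (L : List (Int × Int × String))
    (hL : ∀ x ∈ L, -4 ≤ x.2.1 ∧ x.2.1 ≤ 0) :
    PySem.List.sorted2 L (fun x => x.1) (fun x => x.2.1) true
      = PySem.List.sorted L pvKey true := by
  simp only [PySem.List.sorted2, PySem.List.sorted, if_pos]
  exact pv_foldl_insertBy_congr _ _ (fun x => -4 ≤ x.2.1 ∧ x.2.1 ≤ 0)
    (fun a b ha hb => by
      rw [Bool.eq_iff_iff]
      simp only [Bool.or_eq_true, Bool.and_eq_true, Bool.not_eq_true', decide_eq_true_eq,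
        decide_eq_false_iff_not, pvKey]
      omega)
    L [] hL (by simp)

set_option maxHeartbeats 1000000 in
theorem pv_main (f : String → Int) :
    (match PySem.List.sorted2
        [(f "ramp", -(0:Int), "ramp"), (f "draw", -(1:Int), "draw"),
         (f "interaction", -(2:Int), "interaction"), (f "protection", -(3:Int), "protection"),
         (f "wincon", -(4:Int), "wincon")]
        (fun x => x.1) (fun x => x.2.1) true with
      | [] => "redundancy"
      | (d, _, b) :: _ => if d > 0 then b else "redundancy")
      = (["ramp", "draw", "interaction", "protection", "wincon"].foldl (fun best bucket =>
            if f bucket > best.2 then (bucket, f bucket) else best)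
          ("redundancy", (0 : Int))).1 := by
  rw [pv_sorted2_eq_sorted _ (by
    intro x hx
    simp only [List.mem_cons, List.not_mem_nil, or_false] at hx
    rcases hx with rfl|rfl|rfl|rfl|rfl <;> norm_num)]
  rcases hs : PySem.List.sorted
      [(f "ramp", -(0:Int), "ramp"), (f "draw", -(1:Int), "draw"),
       (f "interaction", -(2:Int), "interaction"), (f "protection", -(3:Int), "protection"),
       (f "wincon", -(4:Int), "wincon")] pvKey true with _ | ⟨m, t⟩
  · exact absurd ((PySem.List.sorted_eq_nil_iff _ _ _).1 hs) (by simp)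
  · have hmax := PySem.List.key_head_sorted_rev_ge _ pvKey hs
    have hm : m ∈ [(f "ramp", -(0:Int), "ramp"), (f "draw", -(1:Int), "draw"),
        (f "interaction", -(2:Int), "interaction"), (f "protection", -(3:Int), "protection"),
        (f "wincon", -(4:Int), "wincon")] := by
      rw [← PySem.List.mem_sorted (key := pvKey) (rev := true), hs]; simp
    have h0 := hmax _ (by simp : (f "ramp", -(0:Int), "ramp") ∈ _)
    have h1 := hmax _ (by simp : (f "draw", -(1:Int), "draw") ∈ _)
    have h2 := hmax _ (by simp : (f "interaction", -(2:Int), "interaction") ∈ _)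
    have h3 := hmax _ (by simp : (f "protection", -(3:Int), "protection") ∈ _)
    have h4 := hmax _ (by simp : (f "wincon", -(4:Int), "wincon") ∈ _)
    simp only [List.foldl]
    simp only [List.mem_cons, List.not_mem_nil, or_false] at hm
    clear hmax hs
    rcases hm with rfl | rfl | rfl | rfl | rfl <;>
      simp only [pvKey] at h0 h1 h2 h3 h4 <;>
      dsimp only at h0 h1 h2 h3 h4 ⊢ <;>
      split_ifs <;> first | rfl | (exfalso; omega)

-- ===== VERDICT (by name: the statement is the Claim_ definition above) =====
theorem weakest_need_bucket_v0_1_py_spec : Claim_equal_weakest_need_bucket_v0_1_py := by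
  intro category_counts targets _
  exact pv_main (fun bucket =>
    PySem.Dict.getD ⟨targets⟩ (bucket ++ "_target") 0 - PySem.Dict.getD ⟨category_counts⟩ bucket 0)
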